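-- pv_equiv track=rewrite | github.com/Demirrr/Programming | Python/zigzag_traversal/solution.py | solution
-- ===== SOURCE A (Python) =====
-- def solution(matrix):
--     n = len(matrix)  # Number of rows
--     m = len(matrix[0])  # Number of columns
--     result = []
--
--     i, j = 0, 0
--     down_left = False  # Start by moving up-right after the initial right step
--
--     while i < n and j < m:
--         # Check if the current cell contains a negative value
--         if matrix[i][j] < 0:
--             result.append((i + 1, j + 1))  # Append the 1-based index of negative values
--
--         # Zigzag traversal logic
--         if down_left:
--             # Move down-left
--             if i + 1 < n and j - 1 >= 0:
--                 i += 1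
--                 j -= 1
--             else:
--                 # Switch to up-right movement at the boundary
--                 down_left = False
--                 if i + 1 < n:
--                     i += 1
--                 else:
--                     j += 1
--         else:
--             # Move up-right
--             if i - 1 >= 0 and j + 1 < m:
--                 i -= 1
--                 j += 1
--             else:
--                 # Switch to down-left movement at the boundary
--                 down_left = True
--                 if j + 1 < m:
--                     j += 1
--                 else:
--                     i += 1
--
--     return result
-- ===== SOURCE B (Python) =====
-- def solution(matrix):
--     n = len(matrix)
--     m = len(matrix[0])  # raises IndexError on empty matrix, like the original
--     result = []
--     for d in range(n + m - 1):
--         lo = max(0, d - m + 1)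
--         hi = min(d, n - 1)
--         rows = range(hi, lo - 1, -1) if d % 2 == 0 else range(lo, hi + 1)
--         for i in rows:
--             j = d - i
--             if matrix[i][j] < 0:
--                 result.append((i + 1, j + 1))
--     return result
-- ===== Notes on version B (the rewrite author's own statement) =====
-- stated objective: alternative
-- what changed: Replaces the stateful while-loop that walks cell to cell with a direction flag by direct diagonal enumeration: for each anti-diagonal d the valid row range is computed in closed form and scanned upward or downward by the parity of d.
import Mathlib
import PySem

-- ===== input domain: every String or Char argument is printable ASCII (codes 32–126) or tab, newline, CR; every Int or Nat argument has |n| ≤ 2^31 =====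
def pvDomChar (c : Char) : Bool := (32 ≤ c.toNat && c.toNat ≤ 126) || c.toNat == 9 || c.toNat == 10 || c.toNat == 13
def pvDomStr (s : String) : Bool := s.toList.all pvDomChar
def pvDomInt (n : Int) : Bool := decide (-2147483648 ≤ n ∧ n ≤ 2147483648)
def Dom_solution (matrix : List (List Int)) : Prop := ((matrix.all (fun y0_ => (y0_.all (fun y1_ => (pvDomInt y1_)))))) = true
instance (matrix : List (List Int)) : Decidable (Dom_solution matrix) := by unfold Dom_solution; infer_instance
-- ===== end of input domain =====

-- B replaces A's stateful cell-to-cell zigzag walk by closed-form diagonal enumeration (alternative, same cost).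

-- ===== PORT A =====
-- While-loop of A; i, j stay ≥ 0 in Python (decrements are guarded), so Nat is exact;
-- 'j - 1 >= 0' becomes '1 ≤ j'.  matrix[i][j] is in range under Pre_solution, so getD is exact.
theorem pvLexHelp {a1 b1 a2 b2 : Nat} (h : a1 < a2 ∨ (a1 = a2 ∧ b1 < b2)) :
    Prod.Lex (α := Nat) (β := Nat) (· < ·) (· < ·) (a1, b1) (a2, b2) := by
  rcases h with h | ⟨rfl, h⟩
  · exact Prod.Lex.left _ _ h
  · exact Prod.Lex.right _ h
def loopA (mat : List (List Int)) (n m : Nat) (i j : Nat) (dl : Bool) (acc : List (Int × Int)) :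
    List (Int × Int) :=
  if h1 : i < n ∧ j < m then
    let acc' := if (mat.getD i []).getD j 0 < 0 then acc ++ [((i : Int) + 1, (j : Int) + 1)] else acc
    if hdl : dl then
      if h2 : i + 1 < n ∧ 1 ≤ j then loopA mat n m (i + 1) (j - 1) true acc'
      else if i + 1 < n then loopA mat n m (i + 1) j false acc'
      else loopA mat n m i (j + 1) false acc'
    else
      if h3 : 1 ≤ i ∧ j + 1 < m then loopA mat n m (i - 1) (j + 1) false acc'
      else if j + 1 < m then loopA mat n m i (j + 1) true acc'
      else loopA mat n m (i + 1) j true acc'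
  else acc
termination_by ((n + m) - (i + j), if dl then n - i else i)
decreasing_by
  all_goals apply pvLexHelp
  · exact Or.inr ⟨by rw [Nat.add_assoc, Nat.add_sub_cancel' h2.2],
      by rw [if_pos trivial, if_pos hdl]; exact Nat.sub_lt_sub_left h1.1 (Nat.lt_succ_self i)⟩
  · exact Or.inl (Nat.sub_lt_sub_left (Nat.add_lt_add h1.1 h1.2)
      (by rw [Nat.add_right_comm]; exact Nat.lt_succ_self (i + j)))
  · exact Or.inl (Nat.sub_lt_sub_left (Nat.add_lt_add h1.1 h1.2)
      (by rw [← Nat.add_assoc]; exact Nat.lt_succ_self (i + j)))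
  · exact Or.inr ⟨by rw [Nat.add_comm j 1, ← Nat.add_assoc, Nat.sub_add_cancel h3.1],
      by rw [if_neg (id : ¬False), if_neg hdl]; exact Nat.sub_lt h3.1 Nat.one_pos⟩
  · exact Or.inl (Nat.sub_lt_sub_left (Nat.add_lt_add h1.1 h1.2)
      (by rw [← Nat.add_assoc]; exact Nat.lt_succ_self (i + j)))
  · exact Or.inl (Nat.sub_lt_sub_left (Nat.add_lt_add h1.1 h1.2)
      (by rw [Nat.add_right_comm]; exact Nat.lt_succ_self (i + j)))

def solution (matrix : List (List Int)) : List (Int × Int) :=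
  let n := matrix.length
  let m := (matrix.getD 0 []).length  -- matrix[0]; Python raises IndexError on [] (excluded by Pre_solution)
  loopA matrix n m 0 0 false []

-- ===== PORT B =====
-- Row indices of anti-diagonal d, in visiting order (Source B: range(hi, lo-1, -1) resp. range(lo, hi+1));
-- Nat subtraction d+1-m equals Python's max(0, d-m+1).
def diagRows (n m d : Nat) : List Nat :=
  let lo := d + 1 - m
  let hi := min d (n - 1)
  let r := List.range' lo (hi + 1 - lo)
  if d % 2 == 0 then r.reverse else r

def solution_alt (matrix : List (List Int)) : List (Int × Int) :=
  let n := matrix.length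
  let m := (matrix.getD 0 []).length
  (List.range (n + m - 1)).foldl (fun res d =>
    (diagRows n m d).foldl (fun res i =>
      if (matrix.getD i []).getD (d - i) 0 < 0 then
        res ++ [((i : Int) + 1, ((d - i : Nat) : Int) + 1)]
      else res) res) []

-- ===== PRECONDITION & SPEC =====
-- Pre_ excludes exactly the inputs where Python A raises IndexError: the empty matrix
-- (matrix[0]) and matrices with a row shorter than the first row (matrix[i][j], j < m).
def Pre_solution (matrix : List (List Int)) : Prop :=
  matrix ≠ [] ∧ ∀ row ∈ matrix, (matrix.getD 0 []).length ≤ row.length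
instance (matrix : List (List Int)) : Decidable (Pre_solution matrix) := by
  unfold Pre_solution; infer_instance
def pvWitness_solution : List (List Int) := [[1, -2], [-3, 4]]

def Spec_solution (matrix : List (List Int)) (out : List (Int × Int)) : Prop := out = solution_alt matrix
instance (matrix : List (List Int)) (out : List (Int × Int)) : Decidable (Spec_solution matrix out) := by unfold Spec_solution; infer_instance

-- ===== CLAIM (what is proved, stated in full; the proofs are below) =====
def Claim_equal_solution : Prop := ∀ (matrix : List (List Int)), Dom_solution matrix → Pre_solution matrix → Spec_solution matrix (solution matrix)

-- ===== LEMMAS AND PROOFS =====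

-- what one visited cell of diagonal d contributes to the output
def visitC (mat : List (List Int)) (d i : Nat) : List (Int × Int) :=
  if (mat.getD i []).getD (d - i) 0 < 0 then [((i : Int) + 1, ((d - i : Nat) : Int) + 1)] else []

def diagOut (mat : List (List Int)) (n m d : Nat) : List (Int × Int) :=
  (diagRows n m d).flatMap (visitC mat d)

def restOut (mat : List (List Int)) (n m d : Nat) : List (Int × Int) :=
  (List.range' d (n + m - 1 - d)).flatMap (diagOut mat n m)

-- the loop state reached after finishing an even diagonal d at its last cell (lo, d-lo)
def nextEven (mat : List (List Int)) (n m d : Nat) (acc : List (Int × Int)) : List (Int × Int) :=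
  if (d - (d + 1 - m)) + 1 < m then loopA mat n m (d + 1 - m) ((d - (d + 1 - m)) + 1) true acc
  else loopA mat n m ((d + 1 - m) + 1) (d - (d + 1 - m)) true acc

-- the loop state reached after finishing an odd diagonal d at its last cell (hi, d-hi)
def nextOdd (mat : List (List Int)) (n m d : Nat) (acc : List (Int × Int)) : List (Int × Int) :=
  if min d (n - 1) + 1 < n then loopA mat n m (min d (n - 1) + 1) (d - min d (n - 1)) false acc
  else loopA mat n m (min d (n - 1)) ((d - min d (n - 1)) + 1) false acc

-- the loop entering diagonal d at its first cell
def startA (mat : List (List Int)) (n m d : Nat) (acc : List (Int × Int)) : List (Int × Int) :=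
  if d % 2 = 0 then loopA mat n m (min d (n - 1)) (d - min d (n - 1)) false acc
  else loopA mat n m (d + 1 - m) (d - (d + 1 - m)) true acc

theorem foldl_visitC (mat : List (List Int)) (d : Nat) :
    ∀ (l : List Nat) (acc : List (Int × Int)),
      l.foldl (fun res i =>
        if (mat.getD i []).getD (d - i) 0 < 0 then
          res ++ [((i : Int) + 1, ((d - i : Nat) : Int) + 1)]
        else res) acc = acc ++ l.flatMap (visitC mat d) := by
  intro l
  induction l with
  | nil => intro acc; simp
  | cons x t ih =>
      intro acc
      simp only [List.foldl_cons, List.flatMap_cons, ih, visitC]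
      split <;> simp

theorem alt_eq_restOut (matrix : List (List Int)) :
    solution_alt matrix = restOut matrix matrix.length (matrix.getD 0 []).length 0 := by
  unfold solution_alt
  simp only [foldl_visitC]
  rw [PySem.List.foldl_append_eq_flatMap]
  simp [restOut, List.range_eq_range']
  rfl

theorem evenStep (mat : List (List Int)) (n m d : Nat) (hn : 1 ≤ n) (hm : 1 ≤ m) :
    ∀ (k : Nat) (acc : List (Int × Int)), d + 1 - m + k ≤ min d (n - 1) →
      loopA mat n m (d + 1 - m + k) (d - (d + 1 - m + k)) false acc =
        nextEven mat n m d
          (acc ++ (List.range' (d + 1 - m) (k + 1)).reverse.flatMap (visitC mat d)) := by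
  intro k
  induction k with
  | zero =>
      intro acc h
      rw [loopA]
      rw [dif_pos (by omega : (d + 1 - m + 0) < n ∧ (d - (d + 1 - m + 0)) < m)]
      simp only [Nat.add_zero]
      rw [dif_neg (by simp : ¬(false = true))]
      rw [dif_neg (by omega : ¬(1 ≤ d + 1 - m ∧ (d - (d + 1 - m)) + 1 < m))]
      rw [nextEven]
      have hacc : (if (mat.getD (d + 1 - m) []).getD (d - (d + 1 - m)) 0 < 0 then
            acc ++ [(((d + 1 - m : Nat) : Int) + 1, ((d - (d + 1 - m) : Nat) : Int) + 1)] else acc)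
          = acc ++ (List.range' (d + 1 - m) 1).reverse.flatMap (visitC mat d) := by
        simp only [List.range'_one, List.reverse_cons, List.reverse_nil, List.nil_append,
          List.flatMap_cons, List.flatMap_nil, List.append_nil, visitC]
        split <;> simp
      rw [hacc]
  | succ k ih =>
      intro acc h
      rw [loopA]
      rw [dif_pos (by omega : (d + 1 - m + (k + 1)) < n ∧ (d - (d + 1 - m + (k + 1))) < m)]
      rw [dif_neg (by simp : ¬(false = true))]
      rw [dif_pos (by omega : 1 ≤ d + 1 - m + (k + 1) ∧ (d - (d + 1 - m + (k + 1))) + 1 < m)]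
      have e1 : d + 1 - m + (k + 1) - 1 = d + 1 - m + k := by omega
      have e2 : (d - (d + 1 - m + (k + 1))) + 1 = d - (d + 1 - m + k) := by omega
      rw [e1, e2, ih _ (by omega)]
      congr 1
      have e3 : List.range' (d + 1 - m) (k + 1 + 1) =
          List.range' (d + 1 - m) (k + 1) ++ [d + 1 - m + (k + 1)] := by
        rw [List.range'_concat]; norm_num
      rw [e3]
      simp only [List.reverse_append, List.reverse_cons, List.reverse_nil, List.nil_append,
        List.flatMap_append, List.flatMap_cons, List.flatMap_nil, List.append_nil]
      unfold visitC
      by_cases hc : (mat.getD (d + 1 - m + (k + 1)) []).getD (d - (d + 1 - m + (k + 1))) 0 < 0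
      · rw [if_pos hc, if_pos hc, List.append_assoc]
      · rw [if_neg hc, if_neg hc]; simp

theorem oddStep (mat : List (List Int)) (n m d : Nat) (hn : 1 ≤ n) (hm : 1 ≤ m) :
    ∀ (k : Nat) (acc : List (Int × Int)), d + 1 - m + k ≤ min d (n - 1) →
      loopA mat n m (min d (n - 1) - k) (d - (min d (n - 1) - k)) true acc =
        nextOdd mat n m d
          (acc ++ (List.range' (min d (n - 1) - k) (k + 1)).flatMap (visitC mat d)) := by
  intro k
  induction k with
  | zero =>
      intro acc h
      rw [loopA]
      rw [dif_pos (by omega : (min d (n - 1) - 0) < n ∧ (d - (min d (n - 1) - 0)) < m)]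
      rw [dif_pos (rfl : true = true)]
      simp only [Nat.sub_zero]
      rw [dif_neg (by omega : ¬(min d (n - 1) + 1 < n ∧ 1 ≤ d - min d (n - 1)))]
      rw [nextOdd]
      have hacc : (if (mat.getD (min d (n - 1)) []).getD (d - min d (n - 1)) 0 < 0 then
            acc ++ [(((min d (n - 1) : Nat) : Int) + 1, ((d - min d (n - 1) : Nat) : Int) + 1)] else acc)
          = acc ++ (List.range' (min d (n - 1)) 1).flatMap (visitC mat d) := by
        simp only [List.range'_one, List.flatMap_cons, List.flatMap_nil, List.append_nil, visitC]
        split <;> simp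
      rw [hacc]
  | succ k ih =>
      intro acc h
      rw [loopA]
      rw [dif_pos (by omega : (min d (n - 1) - (k + 1)) < n ∧ (d - (min d (n - 1) - (k + 1))) < m)]
      rw [dif_pos (rfl : true = true)]
      rw [dif_pos (by omega : min d (n - 1) - (k + 1) + 1 < n ∧ 1 ≤ d - (min d (n - 1) - (k + 1)))]
      have e1 : min d (n - 1) - (k + 1) + 1 = min d (n - 1) - k := by omega
      have e2 : d - (min d (n - 1) - (k + 1)) - 1 = d - (min d (n - 1) - k) := by omega
      rw [e1, e2, ih _ (by omega)]
      congr 1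
      have e3 : List.range' (min d (n - 1) - (k + 1)) (k + 1 + 1) =
          (min d (n - 1) - (k + 1)) :: List.range' (min d (n - 1) - k) (k + 1) := by
        rw [List.range'_succ, e1]
      rw [e3]
      simp only [List.flatMap_cons]
      unfold visitC
      by_cases hc : (mat.getD (min d (n - 1) - (k + 1)) []).getD (d - (min d (n - 1) - (k + 1))) 0 < 0
      · rw [if_pos hc, if_pos hc, List.append_assoc]
      · rw [if_neg hc, if_neg hc]; simp

theorem nextEven_eq (mat : List (List Int)) (n m d : Nat) (hm : 1 ≤ m) (acc : List (Int × Int)) :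
    nextEven mat n m d acc = loopA mat n m ((d + 1) + 1 - m) ((d + 1) - ((d + 1) + 1 - m)) true acc := by
  unfold nextEven
  split_ifs with h <;> congr 1 <;> omega

theorem nextOdd_eq (mat : List (List Int)) (n m d : Nat) (hn : 1 ≤ n) (acc : List (Int × Int)) :
    nextOdd mat n m d acc =
      loopA mat n m (min (d + 1) (n - 1)) ((d + 1) - min (d + 1) (n - 1)) false acc := by
  unfold nextOdd
  split_ifs with h <;> congr 1 <;> omega

theorem restOut_cons (mat : List (List Int)) (n m d : Nat) (hd : d < n + m - 1) :
    restOut mat n m d = diagOut mat n m d ++ restOut mat n m (d + 1) := by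
  unfold restOut
  rw [show n + m - 1 - d = (n + m - 1 - (d + 1)) + 1 from by omega, List.range'_succ,
    List.flatMap_cons]

theorem driver (mat : List (List Int)) (n m : Nat) (hn : 1 ≤ n) (hm : 1 ≤ m) :
    ∀ (k d : Nat) (acc : List (Int × Int)), n + m - 1 ≤ d + k →
      startA mat n m d acc = acc ++ restOut mat n m d := by
  intro k
  induction k with
  | zero =>
      intro d acc h
      have hr : restOut mat n m d = [] := by
        unfold restOut
        rw [show n + m - 1 - d = 0 from by omega]
        simp
      rw [hr, List.append_nil]
      unfold startA
      split_ifs with hp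
      · rw [loopA, dif_neg (by omega : ¬(min d (n - 1) < n ∧ d - min d (n - 1) < m))]
      · rw [loopA, dif_neg (by omega : ¬(d + 1 - m < n ∧ d - (d + 1 - m) < m))]
  | succ k ih =>
      intro d acc h
      by_cases hle : n + m - 1 ≤ d + k
      · exact ih d acc hle
      have hd : d < n + m - 1 := by omega
      have hlohi : d + 1 - m ≤ min d (n - 1) := by omega
      unfold startA
      split_ifs with hp
      · -- even diagonal
        have he := evenStep mat n m d hn hm (min d (n - 1) - (d + 1 - m)) acc (by omega)
        rw [show d + 1 - m + (min d (n - 1) - (d + 1 - m)) = min d (n - 1) from by omega] at he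
        have hstart : ∀ a, loopA mat n m ((d + 1) + 1 - m) ((d + 1) - ((d + 1) + 1 - m)) true a =
            startA mat n m (d + 1) a := by
          intro a; rw [startA, if_neg (by omega : ¬((d + 1) % 2 = 0))]
        rw [he, nextEven_eq mat n m d hm, hstart, ih (d + 1) _ (by omega),
          restOut_cons mat n m d hd, List.append_assoc]
        congr 2
        unfold diagOut diagRows
        rw [if_pos (by simpa using hp)]
        rw [show min d (n - 1) - (d + 1 - m) + 1 = min d (n - 1) + 1 - (d + 1 - m) from by omega]
      · -- odd diagonal
        have ho := oddStep mat n m d hn hm (min d (n - 1) - (d + 1 - m)) acc (by omega)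
        rw [show min d (n - 1) - (min d (n - 1) - (d + 1 - m)) = d + 1 - m from by omega] at ho
        have hstart : ∀ a, loopA mat n m (min (d + 1) (n - 1)) ((d + 1) - min (d + 1) (n - 1)) false a =
            startA mat n m (d + 1) a := by
          intro a; rw [startA, if_pos (by omega : (d + 1) % 2 = 0)]
        rw [ho, nextOdd_eq mat n m d hn, hstart, ih (d + 1) _ (by omega),
          restOut_cons mat n m d hd, List.append_assoc]
        congr 2
        unfold diagOut diagRows
        rw [if_neg (by simpa using hp)]
        rw [show min d (n - 1) - (d + 1 - m) + 1 = min d (n - 1) + 1 - (d + 1 - m) from by omega]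

theorem solution_eq (matrix : List (List Int)) :
    solution matrix = solution_alt matrix := by
  rw [alt_eq_restOut]
  by_cases hn0 : matrix.length = 0
  · -- empty matrix: the loop never runs and every diagonal is empty
    unfold solution
    rw [loopA, dif_neg (by omega)]
    unfold restOut
    have : matrix.length + (matrix.getD 0 []).length - 1 = 0 := by
      rcases matrix with _ | ⟨r, t⟩
      · simp
      · simp at hn0
    rw [this]
    simp
  · have hn : 1 ≤ matrix.length := by omega
    by_cases hm0 : (matrix.getD 0 []).length = 0
    · -- zero-width matrix: the loop guard fails at once and every diagonal is empty
      unfold solution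
      rw [loopA, dif_neg (by omega)]
      unfold restOut
      symm
      rw [List.flatMap_eq_nil_iff]
      intro d _
      have hr : diagRows matrix.length (matrix.getD 0 []).length d = [] := by
        simp only [diagRows, hm0]
        rw [show min d (matrix.length - 1) + 1 - (d + 1 - 0) = 0 from by omega]
        simp
      unfold diagOut
      rw [hr]
      simp
    · have hm : 1 ≤ (matrix.getD 0 []).length := by omega
      unfold solution
      have h0 : loopA matrix matrix.length (matrix.getD 0 []).length 0 0 false [] =
          startA matrix matrix.length (matrix.getD 0 []).length 0 [] := by
        rw [startA, if_pos (by omega : (0 : Nat) % 2 = 0)]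
        congr 1
      rw [h0, driver matrix matrix.length (matrix.getD 0 []).length hn hm
        (matrix.length + (matrix.getD 0 []).length - 1) 0 [] (by omega)]
      simp

-- ===== VERDICT (by name: the statement is the Claim_ definition above) =====
theorem solution_spec : Claim_equal_solution := by
  intro matrix _ _
  unfold Spec_solution
  exact solution_eq matrix
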